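-- pv_equiv track=rewrite | github.com/dutexion/deepresearch | skills/report-to-ko/chunk_report.py | chunk_report
-- ===== SOURCE A (Python) =====
-- def find_heading_positions(lines):
--     """Find line indices where ## or ### headings appear."""
--     positions = []
--     for i, line in enumerate(lines):
--         if line.startswith("## ") or line.startswith("### "):
--             positions.append(i)
--     return positions
--
-- def chunk_report(lines, min_chunk_size=300, max_chunk_size=600):
--     """Split lines into chunks at heading boundaries."""
--     headings = find_heading_positions(lines)
--     if not headings:
--         return [(0, len(lines))]
--
--     chunks = []
--     current_start = 0
--
--     for pos in headings:
--         chunk_size = pos - current_start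
--         if chunk_size >= min_chunk_size:
--             chunks.append((current_start, pos))
--             current_start = pos
--
--     # Last chunk
--     if current_start < len(lines):
--         last_size = len(lines) - current_start
--         # Merge tiny last chunk with previous
--         if last_size < 100 and chunks:
--             prev_start, _ = chunks.pop()
--             chunks.append((prev_start, len(lines)))
--         else:
--             chunks.append((current_start, len(lines)))
--
--     return chunks
-- ===== SOURCE B (Python) =====
-- def chunk_report(lines, min_chunk_size=300, max_chunk_size=600):
--     """Jump-scan: after each cut, skip ahead min_chunk_size lines and search
--     for the first heading from there, instead of enumerating every heading."""
--     n = len(lines)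
--
--     def next_heading(j):
--         for k in range(max(j, 0), n):
--             if lines[k].startswith("## ") or lines[k].startswith("### "):
--                 return k
--         return None
--
--     if next_heading(0) is None:
--         return [(0, n)]
--
--     cuts = [0]
--     lo = min_chunk_size
--     while True:
--         c = next_heading(lo)
--         if c is None:
--             break
--         cuts.append(c)
--         lo = max(c + min_chunk_size, c + 1)
--
--     chunks = list(zip(cuts, cuts[1:]))
--     if n - cuts[-1] < 100 and chunks:
--         chunks[-1] = (chunks[-1][0], n)
--     else:
--         chunks.append((cuts[-1], n))
--     return chunks
-- ===== Notes on version B (the rewrite author's own statement) =====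
-- stated objective: alternative
-- what changed: A indexes every heading and greedily folds over that index list; B never builds a heading list: a jump-scan searches for the first heading at or after current_start + min_chunk_size, emits a cut, skips ahead again, and derives the chunks by zipping the cut sequence with its shift, with one uniform tail-merge rule.
import Mathlib
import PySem

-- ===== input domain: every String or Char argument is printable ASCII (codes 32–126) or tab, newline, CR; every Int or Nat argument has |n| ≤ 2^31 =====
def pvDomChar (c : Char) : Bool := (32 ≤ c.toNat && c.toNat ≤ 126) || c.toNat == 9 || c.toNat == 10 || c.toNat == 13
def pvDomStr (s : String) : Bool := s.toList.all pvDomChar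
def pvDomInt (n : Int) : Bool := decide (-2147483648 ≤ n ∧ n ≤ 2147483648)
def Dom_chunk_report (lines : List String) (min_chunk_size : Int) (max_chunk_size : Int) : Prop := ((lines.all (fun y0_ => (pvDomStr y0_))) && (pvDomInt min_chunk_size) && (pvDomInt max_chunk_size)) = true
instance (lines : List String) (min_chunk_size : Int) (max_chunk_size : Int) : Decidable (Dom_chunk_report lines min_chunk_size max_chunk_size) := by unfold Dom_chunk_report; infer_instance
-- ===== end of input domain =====

-- B replaces A's heading-index pass + greedy fold by a jump-scan: after each cut it skips
-- min_chunk_size lines and searches for the first heading from there; objective: alternative.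

-- ===== PORT A =====
def find_heading_positions (lines : List String) : List Int :=
  (PySem.List.enumerate lines).foldl
    (fun positions il =>
      if PySem.Str.startswith il.2 "## " || PySem.Str.startswith il.2 "### " then
        positions ++ [il.1]
      else positions) []

def chunk_report (lines : List String) (min_chunk_size : Int) (max_chunk_size : Int) : List (Int × Int) :=
  let headings := find_heading_positions lines
  if headings = [] then [(0, (lines.length : Int))]
  else
    let st := headings.foldl
      (fun (st : List (Int × Int) × Int) pos =>
        if pos - st.2 ≥ min_chunk_size then (st.1 ++ [(st.2, pos)], pos) else st)
      ([], 0)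
    let chunks := st.1
    let current_start := st.2
    if current_start < (lines.length : Int) then
      if (lines.length : Int) - current_start < 100 ∧ chunks ≠ [] then
        chunks.dropLast ++ [((chunks.getLastD (0, 0)).1, (lines.length : Int))]
      else
        chunks ++ [(current_start, (lines.length : Int))]
    else chunks

-- ===== PORT B =====
-- next_heading(j): for k in range(max(j,0), n): first k with a heading, else None
def nextHeading (lines : List String) (j : Int) : Option Int :=
  (PySem.List.pyRange (max j 0) (lines.length : Int) 1).find?
    (fun k => PySem.Str.startswith ((PySem.List.pyGet? lines k).getD "") "## " ||
              PySem.Str.startswith ((PySem.List.pyGet? lines k).getD "") "### ")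

-- needed by buildCuts' termination: a found heading lies in [max j 0, n)
theorem nextHeading_bounds {lines : List String} {j c : Int}
    (h : nextHeading lines j = some c) : max j 0 ≤ c ∧ c < (lines.length : Int) :=
  PySem.List.mem_pyRange_one.mp (List.mem_of_find?_eq_some h)

-- the while loop: append the next heading found at or after lo, then jump
def buildCuts (lines : List String) (m : Int) (lo : Int) : List Int :=
  match h : nextHeading lines lo with
  | none => []
  | some c => c :: buildCuts lines m (max (c + m) (c + 1))
termination_by ((lines.length : Int) - lo).toNat
decreasing_by
  have hb := nextHeading_bounds h
  have h1 : lo ≤ max lo 0 := le_max_left _ _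
  have h2 : c + 1 ≤ max (c + m) (c + 1) := le_max_right _ _
  omega

def chunk_report_alt (lines : List String) (min_chunk_size : Int) (max_chunk_size : Int) : List (Int × Int) :=
  let n : Int := (lines.length : Int)
  match nextHeading lines 0 with
  | none => [(0, n)]
  | some _ =>
    let cuts : List Int := 0 :: buildCuts lines min_chunk_size min_chunk_size
    let chunks : List (Int × Int) := cuts.zip (cuts.drop 1)
    let last : Int := cuts.getLastD 0  -- cuts[-1]; cuts is nonempty by construction
    if n - last < 100 ∧ chunks ≠ [] then
      chunks.dropLast ++ [((chunks.getLastD (0, 0)).1, n)]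
    else chunks ++ [(last, n)]

-- ===== PRECONDITION & SPEC =====
def Spec_chunk_report (lines : List String) (min_chunk_size : Int) (max_chunk_size : Int) (out : List (Int × Int)) : Prop := out = chunk_report_alt lines min_chunk_size max_chunk_size
instance (lines : List String) (min_chunk_size : Int) (max_chunk_size : Int) (out : List (Int × Int)) : Decidable (Spec_chunk_report lines min_chunk_size max_chunk_size out) := by unfold Spec_chunk_report; infer_instance

-- ===== CLAIM (what is proved, stated in full; the proofs are below) =====
def Claim_equal_chunk_report : Prop := ∀ (lines : List String) (min_chunk_size : Int) (max_chunk_size : Int), Dom_chunk_report lines min_chunk_size max_chunk_size → Spec_chunk_report lines min_chunk_size max_chunk_size (chunk_report lines min_chunk_size max_chunk_size)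

-- ===== LEMMAS AND PROOFS =====

-- the heading predicate, and A's heading-position list in closed form
def hpred (s : String) : Bool :=
  PySem.Str.startswith s "## " || PySem.Str.startswith s "### "

def headIdx (lines : List String) : List Int :=
  ((PySem.List.enumerate lines).filter (fun il => hpred il.2)).map (·.1)

-- A's greedy pick of cut positions, and the chunk list a cut sequence induces
def picks (m : Int) : List Int → Int → List Int
  | [], _ => []
  | p :: ps, cur => if p - cur ≥ m then p :: picks m ps p else picks m ps cur

def chunkify : Int → List Int → List (Int × Int)
  | _, [] => []
  | cur, p :: ps => (cur, p) :: chunkify p ps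

theorem fhp_eq (lines : List String) : find_heading_positions lines = headIdx lines := by
  unfold find_heading_positions headIdx hpred
  rw [PySem.List.foldl_append_if]
  simp

theorem mem_headIdx {lines : List String} {p : Int} :
    p ∈ headIdx lines ↔ ∃ (k : Nat) (h : k < lines.length), p = (k : Int) ∧ hpred lines[k] = true := by
  simp only [headIdx, List.mem_map, List.mem_filter, PySem.List.mem_enumerate_iff]
  constructor
  · rintro ⟨il, ⟨⟨k, hk, rfl⟩, hp⟩, rfl⟩
    exact ⟨k, hk, by simp, hp⟩
  · rintro ⟨k, hk, rfl, hp⟩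
    exact ⟨((k : Int), lines[k]), ⟨⟨k, hk, by simp⟩, hp⟩, rfl⟩

theorem headIdx_bounds {lines : List String} {p : Int} (hp : p ∈ headIdx lines) :
    0 ≤ p ∧ p < (lines.length : Int) := by
  obtain ⟨k, hk, rfl, -⟩ := mem_headIdx.mp hp
  constructor <;> [positivity; exact_mod_cast hk]

theorem headIdx_pairwise (lines : List String) : (headIdx lines).Pairwise (· < ·) := by
  unfold headIdx
  rw [List.pairwise_map]
  exact (PySem.List.pairwise_lt_enumerate lines 0).filter _

-- sorted-list fact: the first element ≥ j of a sorted list is the head of the ≥-j filter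
theorem head?_filter_sorted {j a : Int} : ∀ (l : List Int), l.Pairwise (· < ·) → a ∈ l → j ≤ a →
    (∀ p ∈ l, j ≤ p → a ≤ p) → (l.filter (fun p => decide (j ≤ p))).head? = some a := by
  intro l
  induction l with
  | nil => intro _ h; cases h
  | cons q tl ih =>
    intro hs hmem hja hmin
    rcases List.mem_cons.mp hmem with rfl | htl
    · simp [hja]
    · have hqa : q < a := (List.pairwise_cons.mp hs).1 a htl
      have hjq : ¬ j ≤ q := fun h => absurd (hmin q (List.mem_cons_self) h) (by omega)
      rw [List.filter_cons, if_neg (by simpa using hjq)]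
      exact ih (List.pairwise_cons.mp hs).2 htl hja (fun p hp => hmin p (List.mem_cons_of_mem _ hp))

-- B's scan characterised: next_heading(j) is the first heading index ≥ j
theorem nextHeading_eq (lines : List String) (j : Int) :
    nextHeading lines j = ((headIdx lines).filter (fun p => decide (j ≤ p))).head? := by
  suffices h : ∀ (t : Nat) (j : Int), ((lines.length : Int) - max j 0).toNat ≤ t →
      nextHeading lines j = ((headIdx lines).filter (fun p => decide (j ≤ p))).head? by
    exact h _ j le_rfl
  intro t
  induction t with
  | zero =>
    intro j ht
    have ha : (lines.length : Int) ≤ max j 0 := by omega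
    have hj0 : (0:Int) ≤ max j 0 := le_max_right _ _
    have hjj : j ≤ max j 0 := le_max_left _ _
    rw [nextHeading, PySem.List.pyRange_one_eq_nil ha]
    rw [List.filter_eq_nil_iff.mpr ?_]
    · rfl
    · intro p hp
      have hb := headIdx_bounds hp
      simp only [decide_eq_true_eq]
      intro hjp
      have : max j 0 ≤ p := max_le hjp hb.1
      omega
  | succ t ih =>
    intro j ht
    by_cases ha : (lines.length : Int) ≤ max j 0
    · -- same empty case
      have hj0 : (0:Int) ≤ max j 0 := le_max_right _ _
      have hjj : j ≤ max j 0 := le_max_left _ _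
      rw [nextHeading, PySem.List.pyRange_one_eq_nil ha]
      rw [List.filter_eq_nil_iff.mpr ?_]
      · rfl
      · intro p hp
        have hb := headIdx_bounds hp
        simp only [decide_eq_true_eq]
        intro hjp
        have : max j 0 ≤ p := max_le hjp hb.1
        omega
    · rw [not_le] at ha
      have hj0 : (0:Int) ≤ max j 0 := le_max_right _ _
      have hjj : j ≤ max j 0 := le_max_left _ _
      set a := max j 0 with hadef
      have hget : PySem.List.pyGet? lines a = some lines[a.toNat] :=
        PySem.List.pyGet?_eq_some_getElem lines hj0 ha
      rw [nextHeading, PySem.List.pyRange_one_cons ha]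
      simp only [List.find?_cons]
      by_cases hh : hpred lines[a.toNat] = true
      · have hcond : (PySem.Str.startswith ((PySem.List.pyGet? lines a).getD "") "## " ||
            PySem.Str.startswith ((PySem.List.pyGet? lines a).getD "") "### ") = true := by
          simp only [hget, Option.getD_some]
          simpa [hpred] using hh
        rw [hcond]
        have hamem : a ∈ headIdx lines :=
          mem_headIdx.mpr ⟨a.toNat, by omega, by omega, hh⟩
        rw [head?_filter_sorted (headIdx lines) (headIdx_pairwise lines) hamem
          (by omega) ?_]
        intro p hp hjp
        have hb := headIdx_bounds hp
        have : a ≤ p := max_le hjp hb.1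
        omega
      · have hcond : (PySem.Str.startswith ((PySem.List.pyGet? lines a).getD "") "## " ||
            PySem.Str.startswith ((PySem.List.pyGet? lines a).getD "") "### ") = false := by
          simp only [hget, Option.getD_some]
          simpa [hpred] using hh
        rw [hcond]
        have hstep : (PySem.List.pyRange (a + 1) (lines.length : Int) 1).find?
            (fun k => PySem.Str.startswith ((PySem.List.pyGet? lines k).getD "") "## " ||
              PySem.Str.startswith ((PySem.List.pyGet? lines k).getD "") "### ") =
            nextHeading lines (a + 1) := by
          rw [nextHeading]
          congr 1
          rw [max_eq_left (show (0:Int) ≤ a + 1 from by omega)]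
        rw [hstep, ih (a + 1) (by rw [max_eq_left (show (0:Int) ≤ a + 1 from by omega)]; omega)]
        show ((headIdx lines).filter (fun p => decide (a + 1 ≤ p))).head? = _
        congr 1
        apply List.filter_congr
        intro p hp
        have hb := headIdx_bounds hp
        have hpa : p ≠ a := by
          rintro rfl
          obtain ⟨k, hk, hpk, hhd⟩ := mem_headIdx.mp hp
          have hk2 : k = a.toNat := by omega
          subst hk2
          exact hh hhd
        simp only [decide_eq_decide]
        constructor
        · intro h; omega
        · intro hjp
          have : a ≤ p := max_le hjp hb.1
          omega

-- A's greedy fold in terms of picks/chunkify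
theorem foldA (m : Int) : ∀ (hs : List Int) (cs : List (Int × Int)) (cur : Int),
    hs.foldl (fun (st : List (Int × Int) × Int) pos =>
        if pos - st.2 ≥ m then (st.1 ++ [(st.2, pos)], pos) else st) (cs, cur)
      = (cs ++ chunkify cur (picks m hs cur), (picks m hs cur).getLastD cur) := by
  intro hs
  induction hs with
  | nil => intro cs cur; simp [picks, chunkify]
  | cons p ps ih =>
    intro cs cur
    simp only [List.foldl_cons, picks]
    by_cases h : p - cur ≥ m
    · rw [if_pos h, if_pos h, ih, List.getLastD_cons]
      simp [chunkify]
    · rw [if_neg h, if_neg h, ih]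

-- dropping the elements below b that the greedy pick would skip anyway
theorem picks_filter (m b : Int) : ∀ (hs : List Int) (cur : Int), hs.Pairwise (· < ·) →
    (∀ p ∈ hs, p < b → ¬ (p - cur ≥ m)) →
    picks m hs cur = picks m (hs.filter (fun p => decide (b ≤ p))) cur := by
  intro hs
  induction hs with
  | nil => intro cur _ _; rfl
  | cons p ps ih =>
    intro cur hs hskip
    have hps := (List.pairwise_cons.mp hs).2
    have hgt := (List.pairwise_cons.mp hs).1
    by_cases hb : b ≤ p
    · rw [List.filter_cons, if_pos (by simpa using hb)]
      have hself : ps.filter (fun p => decide (b ≤ p)) = ps :=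
        List.filter_eq_self.mpr (fun q hq => by simp; have := hgt q hq; omega)
      simp only [picks]
      by_cases h : p - cur ≥ m
      · rw [if_pos h, if_pos h, hself]
      · rw [if_neg h, if_neg h, hself]
    · rw [not_le] at hb
      rw [List.filter_cons, if_neg (by simpa using not_le.mpr hb)]
      simp only [picks]
      rw [if_neg (hskip p List.mem_cons_self hb)]
      exact ih cur hps (fun q hq hqb => hskip q (List.mem_cons_of_mem _ hq) hqb)

-- MAIN: the jump-scan loop produces exactly the greedy picks among headings ≥ lo
theorem buildCuts_eq (lines : List String) (m : Int) :
    ∀ (t : Nat) (lo cur : Int), ((headIdx lines).filter (fun p => decide (lo ≤ p))).length ≤ t →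
    cur + m ≤ lo →
    picks m ((headIdx lines).filter (fun p => decide (lo ≤ p))) cur = buildCuts lines m lo := by
  intro t
  induction t with
  | zero =>
    intro lo cur ht _
    have hnil : (headIdx lines).filter (fun p => decide (lo ≤ p)) = [] :=
      List.eq_nil_of_length_eq_zero (by omega)
    rw [hnil, buildCuts]
    have hnone : nextHeading lines lo = none := by
      rw [nextHeading_eq, hnil]; rfl
    rw [hnone]
    rfl
  | succ t ih =>
    intro lo cur ht hcm
    cases hnh : nextHeading lines lo with
    | none =>
      have hnil : (headIdx lines).filter (fun p => decide (lo ≤ p)) = [] := by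
        rw [nextHeading_eq] at hnh
        exact List.head?_eq_none_iff.mp hnh
      rw [hnil, buildCuts, hnh]
      rfl
    | some c =>
      have hhd : ((headIdx lines).filter (fun p => decide (lo ≤ p))).head? = some c := by
        rw [← nextHeading_eq]; exact hnh
      obtain ⟨rest, hfil⟩ : ∃ rest, (headIdx lines).filter (fun p => decide (lo ≤ p)) = c :: rest := by
        cases hc : (headIdx lines).filter (fun p => decide (lo ≤ p)) with
        | nil => rw [hc] at hhd; cases hhd
        | cons x xs =>
          rw [hc] at hhd
          simp only [List.head?_cons, Option.some.injEq] at hhd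
          exact ⟨xs, by rw [hhd]⟩
      have hloc : lo ≤ c := by
        have : c ∈ (headIdx lines).filter (fun p => decide (lo ≤ p)) := by
          rw [hfil]; exact List.mem_cons_self
        simpa using (List.mem_filter.mp this).2
      have hpw : (c :: rest).Pairwise (· < ·) := by
        rw [← hfil]; exact (headIdx_pairwise lines).filter _
      have hrest_gt : ∀ q ∈ rest, c < q := (List.pairwise_cons.mp hpw).1
      have hrest_pw : rest.Pairwise (· < ·) := (List.pairwise_cons.mp hpw).2
      rw [buildCuts, hnh, hfil]
      simp only [picks]
      rw [if_pos (by omega)]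
      congr 1
      set lo' := max (c + m) (c + 1) with hlo'
      have hlo'1 : c + 1 ≤ lo' := le_max_right _ _
      have hlo'2 : c + m ≤ lo' := le_max_left _ _
      rw [picks_filter m lo' rest c hrest_pw ?_]
      · have hff : rest.filter (fun p => decide (lo' ≤ p)) =
            (headIdx lines).filter (fun p => decide (lo' ≤ p)) := by
          have h1 : (headIdx lines).filter (fun p => decide (lo' ≤ p)) =
              ((headIdx lines).filter (fun p => decide (lo ≤ p))).filter
                (fun p => decide (lo' ≤ p)) := by
            rw [List.filter_filter]
            apply List.filter_congr
            intro p _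
            by_cases h : lo' ≤ p
            · simp [h, show lo ≤ p from by omega]
            · simp [h]
          rw [h1, hfil, List.filter_cons, if_neg (by intro hcc; have := of_decide_eq_true hcc; omega)]
        rw [hff]
        apply ih lo' c ?_ (by omega)
        · rw [← hff]
          have : (rest.filter (fun p => decide (lo' ≤ p))).length ≤ rest.length :=
            List.length_filter_le _ _
          have hlen : (c :: rest).length ≤ t + 1 := by rw [← hfil]; exact ht
          simp at hlen
          omega
      · intro q hq hqlt
        have := hrest_gt q hq
        omega

-- cut sequence → chunk list: chunkify is zip with the shifted list
theorem chunkify_zip : ∀ (ps : List Int) (cur : Int), chunkify cur ps = (cur :: ps).zip ps := by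
  intro ps
  induction ps with
  | nil => intro cur; rfl
  | cons p ps ih => intro cur; simp only [chunkify, List.zip_cons_cons, ih p]

theorem picks_subset (m : Int) : ∀ (hs : List Int) (cur : Int) (p : Int),
    p ∈ picks m hs cur → p ∈ hs := by
  intro hs
  induction hs with
  | nil => intro cur p h; cases h
  | cons q qs ih =>
    intro cur p h
    simp only [picks] at h
    split at h
    · rcases List.mem_cons.mp h with rfl | h
      · exact List.mem_cons_self
      · exact List.mem_cons_of_mem _ (ih q p h)
    · exact List.mem_cons_of_mem _ (ih cur p h)

-- ===== VERDICT (by name: the statement is the Claim_ definition above) =====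
theorem chunk_report_spec : Claim_equal_chunk_report := by
  intro lines m M _
  unfold Spec_chunk_report chunk_report chunk_report_alt
  rw [fhp_eq]
  have hfil0 : (headIdx lines).filter (fun p => decide ((0:Int) ≤ p)) = headIdx lines :=
    List.filter_eq_self.mpr (fun p hp => by simp; exact (headIdx_bounds hp).1)
  cases hnh : nextHeading lines 0 with
  | none =>
    have hnil : headIdx lines = [] := by
      rw [nextHeading_eq, hfil0] at hnh
      exact List.head?_eq_none_iff.mp hnh
    rw [hnil]
    simp
  | some c =>
    have hne : headIdx lines ≠ [] := by
      rw [nextHeading_eq, hfil0] at hnh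
      intro h
      rw [h] at hnh
      cases hnh
    rw [if_neg hne]
    simp only []
    set P := picks m (headIdx lines) 0 with hP
    have hfold := foldA m (headIdx lines) [] 0
    rw [hfold]
    have hbc : buildCuts lines m m = P := by
      rw [← buildCuts_eq lines m ((headIdx lines).filter (fun p => decide (m ≤ p))).length m 0
        le_rfl (by omega)]
      rw [hP]
      exact (picks_filter m m (headIdx lines) 0 (headIdx_pairwise lines)
        (fun p hp hpm => by omega)).symm
    rw [hbc]
    have hzip : ((0 : Int) :: P).zip (((0 : Int) :: P).drop 1) = chunkify 0 P := by
      rw [List.drop_one, List.tail_cons, ← chunkify_zip]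
    have hlast : ((0 : Int) :: P).getLastD 0 = P.getLastD 0 := List.getLastD_cons
    rw [hzip, hlast]
    have hcur : P.getLastD 0 < (lines.length : Int) := by
      cases hPc : P with
      | nil =>
        simp only [List.getLastD_nil]
        obtain ⟨p, hp⟩ := List.exists_mem_of_ne_nil _ hne
        have := headIdx_bounds hp
        omega
      | cons q qs =>
        have hmem : (q :: qs).getLastD 0 ∈ (q :: qs) := by
          rw [List.getLastD_eq_getLast?]
          exact List.mem_of_getLast? rfl
        have : (q :: qs).getLastD 0 ∈ headIdx lines :=
          picks_subset m (headIdx lines) 0 _ (by rw [← hPc] at hmem ⊢; exact hmem)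
        exact (headIdx_bounds this).2
    rw [if_pos hcur]
    simp only [List.nil_append, ← hP]
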